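-- pv_equiv track=rewrite | github.com/KAMO333/ProblemSolvingQA | python/inventory-management/dicts.py | decrement_items
-- ===== SOURCE A (Python) =====
-- def decrement_items(inventory, items):
--     """Decrement items in inventory using elements from the `items` list.
--
--     :param inventory: dict - inventory dictionary.
--     :param items: list - list of items to decrement from the inventory.
--     :return: dict - updated inventory with items decremented.
--     """
--
--     for product in  items:
--         if product not in inventory:
--             continue
--         if product in inventory:
--             inventory[product] -= 1
--
--         if inventory[product] < 0:
--             inventory[product] = 0
--
--     return inventory
-- ===== SOURCE B (Python) =====
-- def decrement_items(inventory, items):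
--     counts = {}
--     for p in items:
--         counts[p] = counts.get(p, 0) + 1
--     for p, n in counts.items():
--         if p in inventory:
--             inventory[p] = max(0, inventory[p] - n)
--     return inventory
-- ===== Notes on version B (the rewrite author's own statement) =====
-- stated objective: alternative
-- what changed: B first builds a frequency table of items, then applies a single clamped subtraction max(0, v - count) per distinct product, instead of A's per-occurrence decrement-and-clamp loop.
import Mathlib
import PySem

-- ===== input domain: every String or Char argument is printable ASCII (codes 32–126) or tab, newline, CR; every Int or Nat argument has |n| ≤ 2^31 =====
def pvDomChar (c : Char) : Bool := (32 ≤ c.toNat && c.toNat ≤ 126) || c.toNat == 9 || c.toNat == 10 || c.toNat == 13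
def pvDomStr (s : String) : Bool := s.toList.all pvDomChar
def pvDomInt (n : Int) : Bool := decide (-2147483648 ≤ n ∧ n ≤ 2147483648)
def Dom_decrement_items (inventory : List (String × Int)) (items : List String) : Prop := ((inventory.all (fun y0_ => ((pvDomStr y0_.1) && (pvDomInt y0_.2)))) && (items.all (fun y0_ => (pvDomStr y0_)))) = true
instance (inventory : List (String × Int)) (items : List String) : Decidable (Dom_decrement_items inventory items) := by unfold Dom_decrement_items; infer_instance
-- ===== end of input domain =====

-- B builds a frequency table of `items` once and applies a single clamped subtraction
-- max(0, v - count) per distinct product, instead of A's per-occurrence decrement-and-clamp loop.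


-- ===== PORT A =====
-- one loop iteration of A: skip absent products, else decrement, then clamp at 0
def pvStepA (d : PySem.Dict String Int) (product : String) : PySem.Dict String Int :=
  if !(d.contains product) then d                               -- if product not in inventory: continue
  else
    let d1 := if d.contains product then d.modify product 0 (· - 1) else d   -- inventory[product] -= 1
    if d1.getD product 0 < 0 then d1.insert product 0 else d1   -- if inventory[product] < 0: inventory[product] = 0

def decrement_items (inventory : List (String × Int)) (items : List String) : List (String × Int) :=
  (items.foldl pvStepA (PySem.Dict.ofList inventory)).items

-- ===== PORT B =====
-- one iteration of B's second loop: apply the aggregated count with one clamped subtraction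
def pvStepB (d : PySem.Dict String Int) (pn : String × Int) : PySem.Dict String Int :=
  if d.contains pn.1 then d.insert pn.1 (max 0 (d.getD pn.1 0 - pn.2)) else d

def decrement_items_alt (inventory : List (String × Int)) (items : List String) : List (String × Int) :=
  let counts := items.foldl (fun c p => c.insert p (c.getD p 0 + 1)) PySem.Dict.empty
  (counts.items.foldl pvStepB (PySem.Dict.ofList inventory)).items

-- ===== PRECONDITION & SPEC =====
def Spec_decrement_items (inventory : List (String × Int)) (items : List String) (out : List (String × Int)) : Prop := out = decrement_items_alt inventory items
instance (inventory : List (String × Int)) (items : List String) (out : List (String × Int)) : Decidable (Spec_decrement_items inventory items out) := by unfold Spec_decrement_items; infer_instance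

-- ===== CLAIM (what is proved, stated in full; the proofs are below) =====
def Claim_equal_decrement_items : Prop := ∀ (inventory : List (String × Int)) (items : List String), Dom_decrement_items inventory items → Spec_decrement_items inventory items (decrement_items inventory items)

-- ===== LEMMAS AND PROOFS =====

-- the effect of n applications of A's "decrement then clamp" on one value
def pvIter : Nat → Int → Int
  | 0, v => v
  | n + 1, v => pvIter n (max 0 (v - 1))

theorem pvIter_eq (n : Nat) (hn : 1 ≤ n) (v : Int) : pvIter n v = max 0 (v - n) := by
  induction n generalizing v with
  | zero => omega
  | succ m ih =>
    rcases Nat.eq_zero_or_pos m with hm | hm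
    · subst hm; simp [pvIter]
    · have := ih (by omega) (max 0 (v - 1))
      simp only [pvIter, this]
      push_cast
      omega

theorem stepA_of_not_contains (d : PySem.Dict String Int) (p : String)
    (h : d.contains p = false) : pvStepA d p = d := by
  simp [pvStepA, h]

theorem keys_stepA (d : PySem.Dict String Int) (p : String) : (pvStepA d p).keys = d.keys := by
  cases h : d.contains p with
  | false => rw [stepA_of_not_contains d p h]
  | true =>
    have hc : (d.modify p 0 (· - 1)).contains p = true := by
      rw [PySem.Dict.contains_modify]; simp
    have hm : (d.modify p 0 (· - 1)).keys = d.keys := by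
      rw [PySem.Dict.keys_modify, PySem.Dict.keys_insert_of_contains _ _ h]
    simp only [pvStepA, h, Bool.not_true, Bool.false_eq_true, if_false, if_true]
    split
    · rw [PySem.Dict.keys_insert_of_contains _ _ hc, hm]
    · exact hm

theorem getD_stepA_self (d : PySem.Dict String Int) (p : String) (h : d.contains p = true) :
    (pvStepA d p).getD p 0 = max 0 (d.getD p 0 - 1) := by
  simp only [pvStepA, h, Bool.not_true, Bool.false_eq_true, if_false, if_true]
  split
  · next h2 =>
    rw [PySem.Dict.getD_modify_self] at h2
    rw [PySem.Dict.getD_insert_self]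
    omega
  · next h2 =>
    rw [PySem.Dict.getD_modify_self] at *
    omega

theorem getD_stepA_of_ne (d : PySem.Dict String Int) (p k : String) (h : k ≠ p) :
    (pvStepA d p).getD k 0 = d.getD k 0 := by
  cases hc : d.contains p with
  | false => rw [stepA_of_not_contains d p hc]
  | true =>
    simp only [pvStepA, hc, Bool.not_true, Bool.false_eq_true, if_false, if_true]
    split
    · rw [PySem.Dict.getD_insert_of_ne _ _ _ h, PySem.Dict.getD_modify_of_ne _ _ _ h]
    · rw [PySem.Dict.getD_modify_of_ne _ _ _ h]

theorem keys_foldlA (l : List String) (d : PySem.Dict String Int) :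
    (l.foldl pvStepA d).keys = d.keys := by
  induction l generalizing d with
  | nil => rfl
  | cons p t ih => rw [List.foldl_cons, ih, keys_stepA]

theorem contains_stepA (d : PySem.Dict String Int) (p k : String) :
    (pvStepA d p).contains k = d.contains k := by
  rw [PySem.Dict.contains_eq_decide_mem_keys, PySem.Dict.contains_eq_decide_mem_keys, keys_stepA]

theorem getD_foldlA (l : List String) (d : PySem.Dict String Int) (k : String) :
    (l.foldl pvStepA d).getD k 0 =
      if d.contains k then pvIter (l.count k) (d.getD k 0) else d.getD k 0 := by
  induction l generalizing d with
  | nil => simp [pvIter]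
  | cons p t ih =>
    rw [List.foldl_cons, ih, contains_stepA]
    by_cases hk : k = p
    · subst hk
      by_cases h : d.contains k = true
      · rw [getD_stepA_self d k h]
        simp [h, pvIter]
      · rw [stepA_of_not_contains d k (by simpa using h)]
        simp [h]
    · have hpk : p ≠ k := fun hh => hk hh.symm
      rw [getD_stepA_of_ne d p k hk]
      simp [hpk]

theorem keys_stepB (d : PySem.Dict String Int) (pn : String × Int) : (pvStepB d pn).keys = d.keys := by
  unfold pvStepB
  split
  · rw [PySem.Dict.keys_insert_of_contains]; assumption
  · rfl

theorem contains_stepB (d : PySem.Dict String Int) (pn : String × Int) (k : String) :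
    (pvStepB d pn).contains k = d.contains k := by
  rw [PySem.Dict.contains_eq_decide_mem_keys, PySem.Dict.contains_eq_decide_mem_keys, keys_stepB]

theorem getD_stepB_of_ne (d : PySem.Dict String Int) (pn : String × Int) (k : String)
    (h : k ≠ pn.1) : (pvStepB d pn).getD k 0 = d.getD k 0 := by
  unfold pvStepB
  split
  · exact PySem.Dict.getD_insert_of_ne _ _ _ h
  · rfl

theorem keys_foldlB (ps : List (String × Int)) (d : PySem.Dict String Int) :
    (ps.foldl pvStepB d).keys = d.keys := by
  induction ps generalizing d with
  | nil => rfl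
  | cons q t ih => rw [List.foldl_cons, ih, keys_stepB]

theorem getD_foldlB_not_mem (ps : List (String × Int)) (d : PySem.Dict String Int) (k : String)
    (hk : k ∉ ps.map Prod.fst) : (ps.foldl pvStepB d).getD k 0 = d.getD k 0 := by
  induction ps generalizing d with
  | nil => rfl
  | cons q t ih =>
    simp only [List.map_cons, List.mem_cons, not_or] at hk
    rw [List.foldl_cons, ih _ hk.2, getD_stepB_of_ne _ _ _ hk.1]

theorem getD_foldlB_mem (ps : List (String × Int)) (d : PySem.Dict String Int) (k : String) (n : Int)
    (hnd : (ps.map Prod.fst).Nodup) (hmem : (k, n) ∈ ps) :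
    (ps.foldl pvStepB d).getD k 0 =
      if d.contains k then max 0 (d.getD k 0 - n) else d.getD k 0 := by
  induction ps generalizing d with
  | nil => cases hmem
  | cons q t ih =>
    simp only [List.map_cons, List.nodup_cons] at hnd
    rcases List.mem_cons.mp hmem with heq | htail
    · subst heq
      rw [List.foldl_cons, getD_foldlB_not_mem t _ k hnd.1]
      unfold pvStepB
      by_cases h : d.contains k = true
      · simp [h, PySem.Dict.getD_insert_self]
      · simp [h]
    · have hkq : k ≠ q.1 := by
        intro h
        exact hnd.1 (h ▸ List.mem_map_of_mem htail)
      rw [List.foldl_cons, ih _ hnd.2 htail, contains_stepB, getD_stepB_of_ne _ _ _ hkq]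

-- ===== VERDICT (by name: the statement is the Claim_ definition above) =====
theorem decrement_items_spec : Claim_equal_decrement_items := by
  intro inventory items _
  unfold Spec_decrement_items decrement_items decrement_items_alt
  show (items.foldl pvStepA (PySem.Dict.ofList inventory)).items =
    ((items.foldl (fun c p => c.insert p (c.getD p 0 + 1)) PySem.Dict.empty).items.foldl pvStepB
      (PySem.Dict.ofList inventory)).items
  rw [PySem.Dict.foldl_insert_getD_add_one_eq_counter, PySem.Dict.items_counter]
  set d0 := PySem.Dict.ofList inventory with hd0
  set ps := (PySem.Set.ofList items).map (fun k => (k, (items.count k : Int))) with hps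
  have hnd0 : d0.keys.Nodup := PySem.Dict.nodup_keys_ofList inventory
  have hkA : (items.foldl pvStepA d0).keys = d0.keys := keys_foldlA items d0
  have hkB : (ps.foldl pvStepB d0).keys = d0.keys := keys_foldlB ps d0
  rw [PySem.Dict.items_eq_map_keys _ (hkA ▸ hnd0) 0, PySem.Dict.items_eq_map_keys _ (hkB ▸ hnd0) 0,
    hkA, hkB]
  apply List.map_congr_left
  intro k _
  have hpsfst : ps.map Prod.fst = PySem.Set.ofList items := by
    rw [hps, List.map_map]; simp only [Function.comp_def]; exact List.map_id _
  have hndps : (ps.map Prod.fst).Nodup := by rw [hpsfst]; exact PySem.Set.nodup_ofList items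
  have hgA := getD_foldlA items d0 k
  by_cases hmem : k ∈ items
  · have hset : k ∈ PySem.Set.ofList items := (PySem.Set.mem_ofList items k).mpr hmem
    have hmemps : (k, (items.count k : Int)) ∈ ps := by
      rw [hps]; exact List.mem_map_of_mem hset
    have hgB := getD_foldlB_mem ps d0 k (items.count k) hndps hmemps
    have hc : 1 ≤ items.count k := List.count_pos_iff.mpr hmem
    rw [hgA, hgB]
    by_cases h : d0.contains k = true
    · simp only [h, if_true]
      rw [pvIter_eq _ hc]
    · rw [if_neg h, if_neg h]
  · have hk : k ∉ ps.map Prod.fst := by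
      rw [hpsfst]; exact fun h => hmem ((PySem.Set.mem_ofList items k).mp h)
    have hgB := getD_foldlB_not_mem ps d0 k hk
    have hc : items.count k = 0 := List.count_eq_zero.mpr hmem
    rw [hgA, hgB, hc]
    split <;> simp [pvIter]
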